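-- pv_equiv track=rewrite | github.com/ajaypokharel/dsa_revision | recursion/n_bit_binary.py | helper
-- ===== SOURCE A (Python) =====
-- import copy
--
-- def helper(number, count_of_one, op, res):
--
--     if number == 0:
--         res.append(op)
--         return
--
--     if count_of_one == 0:
--         helper(number - 1, count_of_one + 1, op + '1', res)
--
--     elif count_of_one > number:
--         op1 = copy.copy(op)
--         op1 += '0'
--         helper(number - 1, count_of_one, op1, res)
--
--     elif number >= count_of_one:
--         helper(number - 1, count_of_one + 1, op + '1', res)
--         helper(number - 1, count_of_one, op + '0', res)
--
--     return res
-- ===== SOURCE B (Python) =====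
-- def helper(number, count_of_one, op, res):
--     # Iterative DFS with an explicit stack instead of recursion; result-list
--     # mutation of `res` is the same as A's. (Claim covers number > 0, where A
--     # returns the list; at number == 0 A returns None.)
--     stack = [(number, count_of_one, op)]
--     while stack:
--         n, c, o = stack.pop()
--         if n == 0:
--             res.append(o)
--         elif c == 0:
--             stack.append((n - 1, c + 1, o + '1'))
--         elif c > n:
--             stack.append((n - 1, c, o + '0'))
--         else:  # n >= c
--             stack.append((n - 1, c, o + '0'))
--             stack.append((n - 1, c + 1, o + '1'))
--     return res
-- ===== Notes on version B (the rewrite author's own statement) =====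
-- stated objective: alternative
-- what changed: Replaces A's recursion (with result-list mutation threaded through recursive calls) by an iterative depth-first search over an explicit stack of (number, count_of_one, prefix) tuples, pushing children in reverse so the '1' child is processed first.
-- outside the precondition, e.g. on helper(0, 0, 'x', []): A returns None, B returns ['x']; on helper(-1, 0, '', []): A raises RecursionError, B does not finish within the time limit
import Mathlib
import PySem

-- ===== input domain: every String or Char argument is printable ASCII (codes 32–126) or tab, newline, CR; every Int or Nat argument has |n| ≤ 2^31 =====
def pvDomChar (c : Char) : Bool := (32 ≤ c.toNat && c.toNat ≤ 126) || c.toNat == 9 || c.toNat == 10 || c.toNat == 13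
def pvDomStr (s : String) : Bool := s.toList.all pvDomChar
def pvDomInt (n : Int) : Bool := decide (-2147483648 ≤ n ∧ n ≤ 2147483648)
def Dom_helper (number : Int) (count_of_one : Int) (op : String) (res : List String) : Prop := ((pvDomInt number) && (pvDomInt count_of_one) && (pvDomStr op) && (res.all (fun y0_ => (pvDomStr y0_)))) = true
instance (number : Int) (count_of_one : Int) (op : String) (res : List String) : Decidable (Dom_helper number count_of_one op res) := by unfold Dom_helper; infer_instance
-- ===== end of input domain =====

-- B replaces A's recursion by an iterative DFS over an explicit stack (objective:
-- alternative decomposition, same cost). Both Pythons mutate `res` in place the same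
-- way; the equivalence proved here is about the returned list.

-- ===== PORT A =====
-- recursion made total with fuel = number.toNat + 1 (each call decreases number by 1);
-- inside Pre_ (number > 0) the fuel is never exhausted.
def helperA_fuel : Nat → Int → Int → String → List String → List String
  | 0, _, _, _, res => res
  | f+1, number, c, op, res =>
    if number = 0 then res ++ [op]
    else if c = 0 then helperA_fuel f (number-1) (c+1) (op ++ "1") res
    else if c > number then helperA_fuel f (number-1) c (op ++ "0") res
    else if number ≥ c then
      helperA_fuel f (number-1) c (op ++ "0") (helperA_fuel f (number-1) (c+1) (op ++ "1") res)
    else res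

def helper (number : Int) (count_of_one : Int) (op : String) (res : List String) : List String :=
  helperA_fuel (number.toNat + 1) number count_of_one op res

-- ===== PORT B =====
-- the while-loop of Source B; head of the list = top of the stack; fuel 2^(number.toNat+1)
-- bounds the number of pops (a tree of depth number has < 2^(number+1) nodes).
def helperB_loop : Nat → List (Int × Int × String) → List String → List String
  | 0, _, res => res
  | _+1, [], res => res
  | f+1, (n, c, o) :: stack, res =>
    if n = 0 then helperB_loop f stack (res ++ [o])
    else if c = 0 then helperB_loop f ((n-1, c+1, o ++ "1") :: stack) res
    else if c > n then helperB_loop f ((n-1, c, o ++ "0") :: stack) res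
    else helperB_loop f ((n-1, c+1, o ++ "1") :: (n-1, c, o ++ "0") :: stack) res

def helper_alt (number : Int) (count_of_one : Int) (op : String) (res : List String) : List String :=
  helperB_loop (2 ^ (number.toNat + 1)) [(number, count_of_one, op)] res

-- ===== PRECONDITION & SPEC =====
-- Pre_ excludes number = 0, where A returns None (no value of the declared list type),
-- and number < 0, where A recurses without bound (RecursionError).
def Pre_helper (number : Int) (count_of_one : Int) (op : String) (res : List String) : Prop := 0 < number
instance (number : Int) (count_of_one : Int) (op : String) (res : List String) : Decidable (Pre_helper number count_of_one op res) := by unfold Pre_helper; infer_instance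

def pvWitness_helper : Int × Int × String × List String := (2, 0, "", [])

def Spec_helper (number : Int) (count_of_one : Int) (op : String) (res : List String) (out : List String) : Prop := out = helper_alt number count_of_one op res
instance (number : Int) (count_of_one : Int) (op : String) (res : List String) (out : List String) : Decidable (Spec_helper number count_of_one op res out) := by unfold Spec_helper; infer_instance

-- ===== CLAIM (what is proved, stated in full; the proofs are below) =====
def Claim_equal_helper : Prop := ∀ (number : Int) (count_of_one : Int) (op : String) (res : List String), Dom_helper number count_of_one op res → Pre_helper number count_of_one op res → Spec_helper number count_of_one op res (helper number count_of_one op res)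

-- ===== LEMMAS AND PROOFS =====

theorem helperB_loop_nil (f : Nat) (res : List String) : helperB_loop f [] res = res := by
  cases f <;> rfl

-- One stack entry (n,c,o) with n ≥ 0 is fully processed in at most 2^(n+1) - 1 pops,
-- and its effect on res is exactly A's recursion on (n,c,o).
theorem run_one : ∀ (k : Nat) (n c : Int) (o : String) (res : List String)
    (stack : List (Int × Int × String)) (f : Nat),
    n.toNat = k → 0 ≤ n → 2 ^ (k+1) - 1 ≤ f →
    ∃ f', helperB_loop f ((n, c, o) :: stack) res
        = helperB_loop f' stack (helperA_fuel (k+1) n c o res)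
      ∧ f - (2 ^ (k+1) - 1) ≤ f' := by
  intro k
  induction k with
  | zero =>
    intro n c o res stack f hk hn hf
    have hn0 : n = 0 := by omega
    subst hn0
    obtain ⟨f1, rfl⟩ : ∃ f1, f = f1 + 1 := ⟨f - 1, by omega⟩
    refine ⟨f1, ?_, by omega⟩
    simp [helperB_loop, helperA_fuel]
  | succ k ih =>
    intro n c o res stack f hk hn hf
    have hnpos : n ≠ 0 := by omega
    have hk' : (n - 1).toNat = k := by omega
    have hn' : 0 ≤ n - 1 := by omega
    have h2 : 2 ^ (k+2) = 2 * 2 ^ (k+1) := by ring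
    have h3 : 1 ≤ 2 ^ (k+1) := Nat.one_le_two_pow
    obtain ⟨f1, rfl⟩ : ∃ f1, f = f1 + 1 := ⟨f - 1, by omega⟩
    by_cases hc0 : c = 0
    · obtain ⟨f', heq, hge⟩ := ih (n-1) (c+1) (o ++ "1") res stack f1 hk' hn' (by omega)
      refine ⟨f', ?_, by omega⟩
      simpa [helperB_loop, helperA_fuel, hnpos, hc0] using heq
    · by_cases hcg : c > n
      · obtain ⟨f', heq, hge⟩ := ih (n-1) c (o ++ "0") res stack f1 hk' hn' (by omega)
        refine ⟨f', ?_, by omega⟩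
        simpa [helperB_loop, helperA_fuel, hnpos, hc0, hcg] using heq
      · have hge' : n ≥ c := by omega
        obtain ⟨f2, heq1, hge1⟩ :=
          ih (n-1) (c+1) (o ++ "1") res ((n-1, c, o ++ "0") :: stack) f1 hk' hn' (by omega)
        obtain ⟨f', heq2, hge2⟩ :=
          ih (n-1) c (o ++ "0") (helperA_fuel (k+1) (n-1) (c+1) (o ++ "1") res) stack f2
            hk' hn' (by omega)
        refine ⟨f', ?_, by omega⟩
        have : helperB_loop (f1+1) ((n, c, o) :: stack) res
            = helperB_loop f1 ((n-1, c+1, o ++ "1") :: (n-1, c, o ++ "0") :: stack) res := by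
          simp [helperB_loop, hnpos, hc0, hcg]
        rw [this, heq1, heq2]
        simp [helperA_fuel, hnpos, hc0, hcg, hge']

-- ===== VERDICT (by name: the statement is the Claim_ definition above) =====
theorem helper_spec : Claim_equal_helper := by
  intro number c op res _ hpre
  replace hpre : 0 < number := hpre
  unfold Spec_helper helper helper_alt
  obtain ⟨f', heq, _⟩ :=
    run_one number.toNat number c op res [] (2 ^ (number.toNat + 1)) rfl (by omega)
      (Nat.sub_le _ _)
  rw [heq, helperB_loop_nil]
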